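-- pv_equiv track=rewrite | github.com/Yatharth88100/accounting_equation_iimu | app.py | search_theory
-- ===== SOURCE A (Python) =====
-- def search_theory(question, sections):
--     q_words = set(question.lower().split())
--     scored = []
--
--     for sec in sections:
--         score = len(q_words & set(sec.lower().split()))
--         if score > 0:
--             scored.append((score, sec))
--
--     scored.sort(reverse=True)
--     return scored[0][1] if scored else None
-- ===== SOURCE B (Python) =====
-- def search_theory(question, sections):
--     q_words = set(question.lower().split())
--     best = None
--     for sec in sections:
--         score = len(q_words & set(sec.lower().split()))
--         if score > 0 and (best is None or best < (score, sec)):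
--             best = (score, sec)
--     return best[1] if best is not None else None
-- ===== Notes on version B (the rewrite author's own statement) =====
-- stated objective: alternative
-- what changed: Replaces build-list-then-sort(reverse=True)-and-take-head with a single pass that keeps a running lexicographic maximum (score, sec) tuple.
import Mathlib
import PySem

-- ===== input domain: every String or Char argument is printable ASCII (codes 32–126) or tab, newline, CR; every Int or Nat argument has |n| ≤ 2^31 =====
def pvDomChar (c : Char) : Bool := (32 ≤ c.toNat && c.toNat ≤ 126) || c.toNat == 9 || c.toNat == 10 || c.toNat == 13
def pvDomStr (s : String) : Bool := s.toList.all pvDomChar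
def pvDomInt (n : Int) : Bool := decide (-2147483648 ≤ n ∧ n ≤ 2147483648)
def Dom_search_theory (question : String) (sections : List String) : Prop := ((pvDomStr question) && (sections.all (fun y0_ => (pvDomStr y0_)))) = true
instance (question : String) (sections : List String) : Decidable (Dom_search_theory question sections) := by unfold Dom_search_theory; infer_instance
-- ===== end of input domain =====

-- B replaces A's build-list-then-sort(reverse=True)-then-take-head with a single
-- linear pass keeping a running lexicographic maximum (score, sec) pair (alternative decomposition, same measured cost).


-- ===== PORT A =====
def search_theory (question : String) (sections : List String) : Option String :=
  let q_words := PySem.Set.ofList (PySem.Str.split₀ (PySem.Str.lower question))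
  let scored := sections.foldl (fun acc sec =>
      let score := PySem.Set.len (PySem.Set.inter q_words (PySem.Set.ofList (PySem.Str.split₀ (PySem.Str.lower sec))))
      if score > 0 then acc ++ [(score, sec)] else acc) []
  match PySem.List.sorted2 scored (fun p => p.1) (fun p => p.2) true with
  | [] => none
  | p :: _ => some p.2

-- ===== PORT B =====
def search_theory_alt (question : String) (sections : List String) : Option String :=
  let q_words := PySem.Set.ofList (PySem.Str.split₀ (PySem.Str.lower question))
  let best := sections.foldl (fun best sec =>
      let score := PySem.Set.len (PySem.Set.inter q_words (PySem.Set.ofList (PySem.Str.split₀ (PySem.Str.lower sec))))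
      if score > 0 && (match best with
                       | none => true
                       | some b => decide (b.1 < score) || (decide (b.1 = score) && decide (b.2 < sec)))
      then some (score, sec) else best) none
  best.map (fun p => p.2)

-- ===== PRECONDITION & SPEC =====
def Spec_search_theory (question : String) (sections : List String) (out : Option String) : Prop := out = search_theory_alt question sections
instance (question : String) (sections : List String) (out : Option String) : Decidable (Spec_search_theory question sections out) := by unfold Spec_search_theory; infer_instance

-- ===== CLAIM (what is proved, stated in full; the proofs are below) =====
def Claim_equal_search_theory : Prop := ∀ (question : String) (sections : List String), Dom_search_theory question sections → Spec_search_theory question sections (search_theory question sections)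

-- ===== LEMMAS AND PROOFS =====

-- one max-step of a head-of-sorted computation
def pvMaxStep {α : Type} (before : α → α → Bool) (b : Option α) (p : α) : Option α :=
  match b with
  | none => some p
  | some q => if before p q then some p else some q

theorem head?_insertBy {α : Type} (before : α → α → Bool) (x : α) (acc : List α) :
    (PySem.List.insertBy before x acc).head? = pvMaxStep before acc.head? x := by
  cases acc with
  | nil => simp [PySem.List.insertBy, pvMaxStep]
  | cons y ys =>
    simp only [PySem.List.insertBy, pvMaxStep, List.head?]
    split_ifs <;> simp

theorem head?_foldl_insertBy {α : Type} (before : α → α → Bool) (L : List α) (acc : List α) :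
    (L.foldl (fun a x => PySem.List.insertBy before x a) acc).head? =
      L.foldl (pvMaxStep before) acc.head? := by
  induction L generalizing acc with
  | nil => rfl
  | cons x t ih =>
    simp only [List.foldl_cons]
    rw [ih, head?_insertBy]

theorem foldl_append_filter {α β : Type} (cond : β → Prop) [DecidablePred cond] (f : β → α)
    (before : α → α → Bool) (secs : List β) (L : List α) :
    ((secs.foldl (fun acc s => if cond s then acc ++ [f s] else acc) L).foldl
        (pvMaxStep before) none) =
      secs.foldl (fun b s => if cond s then pvMaxStep before b (f s) else b)
        (L.foldl (pvMaxStep before) none) := by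
  induction secs generalizing L with
  | nil => rfl
  | cons s t ih =>
    simp only [List.foldl_cons]
    rw [ih]
    congr 1
    split_ifs with h
    · simp
    · rfl

theorem pvStep_eq (s : Int) (sec : String) (b : Option (Int × String)) :
    (if s > 0 then
        pvMaxStep (fun a b => decide (b.1 < a.1) || (!decide (a.1 < b.1) && decide (b.2 < a.2))) b (s, sec)
      else b) =
    (if (decide (s > 0) && (match b with
                            | none => true
                            | some q => decide (q.1 < s) || (decide (q.1 = s) && decide (q.2 < sec)))) = true
      then some (s, sec) else b) := by
  cases b with
  | none => by_cases h : s > 0 <;> simp [pvMaxStep, h]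
  | some q =>
    by_cases h : s > 0
    · simp only [h, if_pos, decide_true, Bool.true_and, pvMaxStep]
      by_cases h1 : q.1 < s
      · simp [h1, not_lt_of_gt h1]
      · by_cases h2 : s < q.1
        · have hne : ¬ (q.1 = s) := by omega
          simp [h1, h2, hne]
        · have he : q.1 = s := by omega
          by_cases h3 : q.2 < sec <;> simp [he, h3]
    · simp [h]

theorem search_theory_eq_alt (question : String) (sections : List String) :
    search_theory question sections = search_theory_alt question sections := by
  unfold search_theory search_theory_alt
  simp only [PySem.List.sorted2, if_true]
  set q_words := PySem.Set.ofList (PySem.Str.split₀ (PySem.Str.lower question)) with hq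
  set sc : String → Int := fun sec =>
    PySem.Set.len (PySem.Set.inter q_words (PySem.Set.ofList (PySem.Str.split₀ (PySem.Str.lower sec)))) with hsc
  set before : (Int × String) → (Int × String) → Bool := fun a b =>
    decide (b.1 < a.1) || (!decide (a.1 < b.1) && decide (b.2 < a.2)) with hbefore
  -- A's head-of-reverse-sorted list is a pvMaxStep fold over the scored list
  have hA : ∀ (L : List (Int × String)),
      (match L.foldl (fun acc x => PySem.List.insertBy before x acc) [] with
        | [] => (none : Option String)
        | p :: _ => some p.2) =
      (L.foldl (pvMaxStep before) none).map (fun p => p.2) := by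
    intro L
    have h := head?_foldl_insertBy before L []
    cases hres : L.foldl (fun a x => PySem.List.insertBy before x a) [] with
    | nil => rw [hres] at h; simp at h; simp [← h]
    | cons p t => rw [hres] at h; simp at h; simp [← h]
  rw [hA]
  rw [foldl_append_filter (fun sec => sc sec > 0) (fun sec => (sc sec, sec)) before sections []]
  -- the per-element steps agree
  apply congrArg (Option.map fun p : Int × String => p.2)
  apply PySem.List.foldl_congr_mem
  intro b sec _
  exact pvStep_eq (sc sec) sec b

-- ===== VERDICT (by name: the statement is the Claim_ definition above) =====
theorem search_theory_spec : Claim_equal_search_theory := by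
  intro question sections _
  unfold Spec_search_theory
  exact search_theory_eq_alt question sections
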